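-- pv_equiv track=rewrite | github.com/VentsislavVR/CodeWars | 7-kyu/Closing_in_Sum.py | closing_in_sum
-- ===== SOURCE A (Python) =====
-- def closing_in_sum(n):
--     number_str = str(n)
--     length = len(number_str)
--
--     sum_result = 0
--     for i in range(length // 2):
--         first_digit = int(number_str[i])
--         last_digit = int(number_str[length - 1 - i])
--         formed_number = int(str(first_digit) + str(last_digit))
--         sum_result += formed_number
--
--     if length % 2 == 1:
--         sum_result += int(number_str[length // 2])
--
--     return sum_result
-- ===== SOURCE B (Python) =====
-- def closing_in_sum(n):
--     s = str(n)
--     h = len(s) // 2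
--     total = 10 * sum(int(c) for c in s[:h]) + sum(int(c) for c in s[len(s) - h:])
--     if len(s) % 2 == 1:
--         total += int(s[h])
--     return total
-- ===== Notes on version B (the rewrite author's own statement) =====
-- stated objective: simpler
-- what changed: Replaces the interleaved pairing loop (index both ends, stringify each digit pair and re-parse it) with two independent slice sums using the identity int(str(a)+str(b)) = 10*a+b: 10*sum of first-half digits plus sum of second-half digits, plus the middle digit when the length is odd.
import Mathlib
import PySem

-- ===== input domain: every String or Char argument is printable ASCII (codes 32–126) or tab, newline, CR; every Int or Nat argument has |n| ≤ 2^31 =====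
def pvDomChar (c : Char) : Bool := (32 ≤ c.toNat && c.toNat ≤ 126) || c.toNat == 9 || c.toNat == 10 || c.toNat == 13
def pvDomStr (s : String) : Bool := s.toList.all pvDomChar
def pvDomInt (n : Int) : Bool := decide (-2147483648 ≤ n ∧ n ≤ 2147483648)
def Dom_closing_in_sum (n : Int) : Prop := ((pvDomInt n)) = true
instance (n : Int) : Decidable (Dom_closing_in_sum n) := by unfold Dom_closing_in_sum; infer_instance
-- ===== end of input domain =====

-- B replaces A's interleaved pairing loop by two independent slice sums (10*first-half-digit-sum
-- + second-half-digit-sum + middle digit), for simplicity; equal on all n ≥ 0 (A raises on n < 0).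

-- ===== PORT A =====
-- int(...) is ported as (ofChars? ...).getD 0; the none (ValueError) case is unreachable under
-- Pre_ (0 ≤ n, so every character of str(n) is a decimal digit), likewise pyGetD's default.
def closing_in_sum (n : Int) : Int :=
  let number_str := PySem.Int.toChars n
  let length : Int := (number_str.length : Int)
  let sum_result : Int :=
    (PySem.List.pyRange 0 (PySem.Int.floordiv length 2) 1).foldl
      (fun sum_result i =>
        let first_digit := (PySem.Int.ofChars? [PySem.List.pyGetD number_str i ' ']).getD 0
        let last_digit := (PySem.Int.ofChars? [PySem.List.pyGetD number_str (length - 1 - i) ' ']).getD 0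
        let formed_number := (PySem.Int.ofChars? (PySem.Int.toChars first_digit ++ PySem.Int.toChars last_digit)).getD 0
        sum_result + formed_number) 0
  if PySem.Int.mod length 2 = 1 then
    sum_result + (PySem.Int.ofChars? [PySem.List.pyGetD number_str (PySem.Int.floordiv length 2) ' ']).getD 0
  else
    sum_result

-- ===== PORT B =====
-- int(c) for a one-character string c (ValueError unreachable under Pre_)
def pvDigitVal (c : Char) : Int := (PySem.Int.ofChars? [c]).getD 0

def closing_in_sum_alt (n : Int) : Int :=
  let s := PySem.Int.toChars n
  let h : Nat := s.length / 2
  let total : Int := 10 * ((s.take h).map pvDigitVal).sum + ((s.drop (s.length - h)).map pvDigitVal).sum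
  if s.length % 2 = 1 then total + pvDigitVal (s.getD h ' ') else total

-- ===== PRECONDITION & SPEC =====
-- A raises ValueError for n < 0 (int('-') on the sign character); Pre_ excludes exactly those.
def Pre_closing_in_sum (n : Int) : Prop := 0 ≤ n
instance (n : Int) : Decidable (Pre_closing_in_sum n) := by unfold Pre_closing_in_sum; infer_instance
def pvWitness_closing_in_sum : Int := (12345)
def Spec_closing_in_sum (n : Int) (out : Int) : Prop := out = closing_in_sum_alt n
instance (n : Int) (out : Int) : Decidable (Spec_closing_in_sum n out) := by unfold Spec_closing_in_sum; infer_instance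

-- ===== CLAIM (what is proved, stated in full; the proofs are below) =====
def Claim_equal_closing_in_sum : Prop := ∀ (n : Int), Dom_closing_in_sum n → Pre_closing_in_sum n → Spec_closing_in_sum n (closing_in_sum n)

-- ===== LEMMAS AND PROOFS =====

def pvDigits : List Char := ['0', '1', '2', '3', '4', '5', '6', '7', '8', '9']

theorem pv_digitChar_mem (r : Nat) (hr : r < 10) : Nat.digitChar r ∈ pvDigits := by
  interval_cases r <;> decide

theorem pv_toDigitsCore_digits (f : Nat) :
    ∀ (m : Nat) (l : List Char), (∀ c ∈ l, c ∈ pvDigits) →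
      ∀ c ∈ Nat.toDigitsCore 10 f m l, c ∈ pvDigits := by
  induction f with
  | zero => intro m l hl c hc; exact hl c hc
  | succ f ih =>
    intro m l hl c hc
    simp only [Nat.toDigitsCore] at hc
    by_cases hm : m / 10 = 0
    · rw [if_pos hm] at hc
      rcases List.mem_cons.mp hc with h | h
      · exact h ▸ pv_digitChar_mem _ (Nat.mod_lt _ (by omega))
      · exact hl c h
    · rw [if_neg hm] at hc
      refine ih (m / 10) _ ?_ c hc
      intro c' hc'
      rcases List.mem_cons.mp hc' with h | h
      · exact h ▸ pv_digitChar_mem _ (Nat.mod_lt _ (by omega))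
      · exact hl c' h

theorem pv_toChars_digits (n : Int) (hn : 0 ≤ n) :
    ∀ c ∈ PySem.Int.toChars n, c ∈ pvDigits := by
  intro c hc
  simp only [PySem.Int.toChars, if_neg (by omega : ¬ n < 0)] at hc
  exact pv_toDigitsCore_digits _ _ _ (by simp) c hc

theorem pv_formed (c1 c2 : Char) (h1 : c1 ∈ pvDigits) (h2 : c2 ∈ pvDigits) :
    (PySem.Int.ofChars? (PySem.Int.toChars ((PySem.Int.ofChars? [c1]).getD 0) ++
        PySem.Int.toChars ((PySem.Int.ofChars? [c2]).getD 0))).getD 0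
      = 10 * pvDigitVal c1 + pvDigitVal c2 := by
  fin_cases h1 <;> fin_cases h2 <;> decide

theorem pv_sum_first (s : List Char) (h : Nat) (hh : h ≤ s.length) :
    ((List.range h).map (fun k => pvDigitVal (s.getD k ' '))).sum
      = ((s.take h).map pvDigitVal).sum := by
  induction h with
  | zero => simp
  | succ h ih =>
    have hlt : h < s.length := by omega
    rw [List.range_succ, List.map_append, List.sum_append, ih (by omega)]
    have h1 : s.take (h + 1) = s.take h ++ [s[h]] := by
      rw [List.take_add_one, List.getElem?_eq_getElem hlt]; rfl
    rw [h1, List.map_append, List.sum_append]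
    simp only [List.map_cons, List.map_nil, List.sum_cons, List.sum_nil]
    rw [List.getD_eq_getElem s ' ' hlt]

theorem pv_rev_list (s : List Char) (h : Nat) (hh : h ≤ s.length) :
    (List.range h).map (fun k => s.getD (s.length - 1 - k) ' ')
      = (s.drop (s.length - h)).reverse := by
  apply List.ext_getElem
  · simp; omega
  · intro k hk1 hk2
    simp only [List.getElem_map, List.getElem_range, List.getElem_reverse, List.getElem_drop]
    have hk : k < h := by simpa using hk1
    have hidx : s.length - 1 - k < s.length := by omega
    rw [List.getD_eq_getElem s ' ' hidx]
    congr 1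
    simp only [List.length_drop]
    omega

theorem pv_sum_last (s : List Char) (h : Nat) (hh : h ≤ s.length) :
    ((List.range h).map (fun k => pvDigitVal (s.getD (s.length - 1 - k) ' '))).sum
      = ((s.drop (s.length - h)).map pvDigitVal).sum := by
  have : (List.range h).map (fun k => pvDigitVal (s.getD (s.length - 1 - k) ' '))
      = ((s.drop (s.length - h)).reverse.map pvDigitVal) := by
    rw [← pv_rev_list s h hh, List.map_map]; rfl
  rw [this, List.map_reverse, List.sum_reverse]

theorem pv_foldl_sum {α : Type} (f : α -> Int) (l : List α) (init : Int) :
    l.foldl (fun a x => a + f x) init = init + (l.map f).sum := by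
  induction l generalizing init with
  | nil => simp
  | cons x xs ih => simp only [List.foldl_cons, List.map_cons, List.sum_cons, ih]; ring

theorem pv_main (s : List Char) (hd : ∀ c ∈ s, c ∈ pvDigits) :
    (let number_str := s
     let length : Int := (number_str.length : Int)
     let sum_result : Int :=
       (PySem.List.pyRange 0 (PySem.Int.floordiv length 2) 1).foldl
         (fun sum_result i =>
           let first_digit := (PySem.Int.ofChars? [PySem.List.pyGetD number_str i ' ']).getD 0
           let last_digit := (PySem.Int.ofChars? [PySem.List.pyGetD number_str (length - 1 - i) ' ']).getD 0
           let formed_number := (PySem.Int.ofChars? (PySem.Int.toChars first_digit ++ PySem.Int.toChars last_digit)).getD 0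
           sum_result + formed_number) 0
     if PySem.Int.mod length 2 = 1 then
       sum_result + (PySem.Int.ofChars? [PySem.List.pyGetD number_str (PySem.Int.floordiv length 2) ' ']).getD 0
     else
       sum_result)
    =
    (let h : Nat := s.length / 2
     let total : Int := 10 * ((s.take h).map pvDigitVal).sum + ((s.drop (s.length - h)).map pvDigitVal).sum
     if s.length % 2 = 1 then total + pvDigitVal (s.getD h ' ') else total) := by
  have hle : s.length / 2 ≤ s.length := Nat.div_le_self _ _
  have hfd : PySem.Int.floordiv (s.length : Int) 2 = ((s.length / 2 : Nat) : Int) := by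
    exact_mod_cast PySem.Int.floordiv_natCast s.length 2
  have hmd : PySem.Int.mod (s.length : Int) 2 = ((s.length % 2 : Nat) : Int) := by
    exact_mod_cast PySem.Int.mod_natCast s.length 2
  simp only [hfd, hmd, PySem.List.pyRange_one, sub_zero, Int.toNat_natCast, List.foldl_map]
  rw [pv_foldl_sum, zero_add]
  have hkey : ∀ k ∈ List.range (s.length / 2),
      (PySem.Int.ofChars? (PySem.Int.toChars ((PySem.Int.ofChars? [PySem.List.pyGetD s ((0 : Int) + (k : Int)) ' ']).getD 0) ++
          PySem.Int.toChars ((PySem.Int.ofChars? [PySem.List.pyGetD s ((s.length : Int) - 1 - ((0 : Int) + (k : Int))) ' ']).getD 0))).getD 0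
        = 10 * pvDigitVal (s.getD k ' ') + pvDigitVal (s.getD (s.length - 1 - k) ' ') := by
    intro k hk
    have hk' : k < s.length / 2 := List.mem_range.mp hk
    have hkL : k < s.length := by omega
    have hi1 : (0 : Int) + (k : Int) = ((k : Nat) : Int) := by omega
    have hi2 : (s.length : Int) - 1 - (k : Int) = ((s.length - 1 - k : Nat) : Int) := by
      omega
    rw [hi1, hi2, PySem.List.pyGetD_natCast, PySem.List.pyGetD_natCast]
    refine pv_formed _ _ ?_ ?_
    · exact hd _ (by rw [List.getD_eq_getElem s ' ' hkL]; exact List.getElem_mem hkL)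
    · have hL2 : s.length - 1 - k < s.length := by omega
      exact hd _ (by rw [List.getD_eq_getElem s ' ' hL2]; exact List.getElem_mem hL2)
  rw [List.map_congr_left hkey]
  have hsplit : (List.map (fun k => 10 * pvDigitVal (s.getD k ' ') + pvDigitVal (s.getD (s.length - 1 - k) ' ')) (List.range (s.length / 2))).sum
      = 10 * ((s.take (s.length / 2)).map pvDigitVal).sum + ((s.drop (s.length - s.length / 2)).map pvDigitVal).sum := by
    rw [← pv_sum_first s _ hle, ← pv_sum_last s _ hle, ← List.sum_map_mul_left, ← List.sum_map_add]
  rw [hsplit]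
  by_cases hodd : s.length % 2 = 1
  · rw [if_pos (by exact_mod_cast hodd), if_pos hodd, PySem.List.pyGetD_natCast]; rfl
  · rw [if_neg (by exact_mod_cast hodd), if_neg hodd]

theorem pv_spec_aux (n : Int) (hn : 0 ≤ n) : closing_in_sum n = closing_in_sum_alt n := by
  have hd := pv_toChars_digits n hn
  unfold closing_in_sum closing_in_sum_alt
  revert hd
  generalize PySem.Int.toChars n = s
  intro hd
  exact pv_main s hd

-- ===== VERDICT (by name: the statement is the Claim_ definition above) =====
theorem closing_in_sum_spec : Claim_equal_closing_in_sum := by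
  intro n _ hpre
  unfold Spec_closing_in_sum
  exact pv_spec_aux n hpre
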